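-- pv_equiv track=rewrite | github.com/NicoFuentese/Fundamentos-de-Algoritmos-PUCV | MODULO3/AYUDANTIA/A2.4_listas.py | espaldaCamello
-- ===== SOURCE A (Python) =====
-- def espaldaCamello(lista):
--     contador = 0
--     for i in range (1, len(lista) - 1):
--         if ((lista[i] < lista[i - 1] and lista[i] < lista[i + 1]) or
--             (lista[i] > lista[i - 1] and lista[i] > lista[i + 1])):
--                 contador += 1
--     if (contador == len(lista) - 2):
--         return True
--     return False
-- ===== SOURCE B (Python) =====
-- def espaldaCamello(lista):
--     # Camel-back check via direction signs: each adjacent pair yields +1/-1/0,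
--     # and the list zig-zags iff every two consecutive signs are strictly opposite.
--     if len(lista) < 2:
--         return False
--     signs = [(1 if a < b else (-1 if a > b else 0)) for a, b in zip(lista, lista[1:])]
--     return all(s * t == -1 for s, t in zip(signs, signs[1:]))
-- ===== Notes on version B (the rewrite author's own statement) =====
-- stated objective: alternative
-- what changed: B replaces A's count-interior-extrema-then-compare-with-len-2 arithmetic by first materialising the list of direction signs of consecutive pairs and then checking that every two adjacent signs are strictly opposite (product -1), with explicit length-<2 handling.
import Mathlib
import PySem

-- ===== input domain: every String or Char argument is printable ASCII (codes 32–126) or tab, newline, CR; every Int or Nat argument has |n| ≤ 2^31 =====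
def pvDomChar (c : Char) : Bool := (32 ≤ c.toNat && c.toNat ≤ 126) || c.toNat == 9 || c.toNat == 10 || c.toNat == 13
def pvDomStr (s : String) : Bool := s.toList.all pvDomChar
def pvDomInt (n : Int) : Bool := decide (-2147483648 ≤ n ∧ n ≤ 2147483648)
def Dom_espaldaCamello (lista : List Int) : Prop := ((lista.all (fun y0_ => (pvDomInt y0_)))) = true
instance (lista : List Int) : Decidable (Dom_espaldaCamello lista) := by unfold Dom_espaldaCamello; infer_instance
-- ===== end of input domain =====

-- B re-derives the camel-back test from a list of direction signs of consecutive pairs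
-- (alternation check) instead of A's count-of-interior-extrema == len-2 arithmetic;
-- objective: alternative decomposition, same O(n) cost.


-- ===== PORT A =====
def espaldaCamello (lista : List Int) : Bool :=
  -- indices i range over [1, len-2], so every lista[i-1], lista[i], lista[i+1] is in
  -- range: pyGetD is exact here (Python never raises in this loop)
  let contador : Int :=
    (PySem.List.pyRange 1 ((lista.length : Int) - 1) 1).foldl
      (fun c i =>
        if (PySem.List.pyGetD lista i 0 < PySem.List.pyGetD lista (i - 1) 0 ∧
              PySem.List.pyGetD lista i 0 < PySem.List.pyGetD lista (i + 1) 0) ∨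
           (PySem.List.pyGetD lista i 0 > PySem.List.pyGetD lista (i - 1) 0 ∧
              PySem.List.pyGetD lista i 0 > PySem.List.pyGetD lista (i + 1) 0)
        then c + 1 else c) 0
  if contador = (lista.length : Int) - 2 then true else false

-- ===== PORT B =====
def espaldaCamello_alt (lista : List Int) : Bool :=
  if lista.length < 2 then false
  else
    -- lista[1:] is exactly lista.drop 1 (PySem.List.slice_from)
    let signs : List Int :=
      (lista.zip (lista.drop 1)).map
        (fun p => if p.1 < p.2 then 1 else if p.1 > p.2 then -1 else 0)
    (signs.zip (signs.drop 1)).all (fun p => p.1 * p.2 == -1)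

-- ===== PRECONDITION & SPEC =====
def Spec_espaldaCamello (lista : List Int) (out : Bool) : Prop := out = espaldaCamello_alt lista
instance (lista : List Int) (out : Bool) : Decidable (Spec_espaldaCamello lista out) := by unfold Spec_espaldaCamello; infer_instance

-- ===== CLAIM (what is proved, stated in full; the proofs are below) =====
def Claim_equal_espaldaCamello : Prop := ∀ (lista : List Int), Dom_espaldaCamello lista → Spec_espaldaCamello lista (espaldaCamello lista)

-- ===== LEMMAS AND PROOFS =====

/-- Common characterisation: every interior element is a strict local extremum. -/
def CamelSpec (l : List Int) : Prop :=
  ∀ k : Nat, (h : k + 2 < l.length) →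
    (l[k + 1] < l[k] ∧ l[k + 1] < l[k + 2]) ∨ (l[k] < l[k + 1] ∧ l[k + 2] < l[k + 1])

/-- A's final comparison: the count over range(1, L-1) equals L-2 iff L ≥ 2 and
every index of the range satisfies the predicate. -/
theorem count_iff (p : Int → Bool) (L : Nat) :
    (((PySem.List.pyRange 1 ((L : Int) - 1) 1).countP p : Int) = (L : Int) - 2)
      ↔ (2 ≤ L ∧ ∀ i ∈ PySem.List.pyRange 1 ((L : Int) - 1) 1, p i = true) := by
  have hlen := PySem.List.length_pyRange_one 1 ((L : Int) - 1)
  have hle := List.countP_le_length (p := p) (l := PySem.List.pyRange 1 ((L : Int) - 1) 1)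
  constructor
  · intro hc
    exact ⟨by omega, List.countP_eq_length.mp (by omega)⟩
  · rintro ⟨h2, hall⟩
    have := List.countP_eq_length.mpr hall
    omega

/-- The sign product test on three consecutive values is the strict-extremum test. -/
theorem sign_mul_iff (a b c : Int) :
    (((if a < b then (1 : Int) else if a > b then -1 else 0) *
        (if b < c then (1 : Int) else if b > c then -1 else 0) == -1) = true)
      ↔ ((b < a ∧ b < c) ∨ (a < b ∧ c < b)) := by
  rw [beq_iff_eq]
  split_ifs <;> norm_num <;> omega

/-- A's in-range `pyGetD` reads are plain `getElem` reads, stated for index `k+1`. -/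
theorem pyGetD_reads (l : List Int) (k : Nat) (hk : k + 2 < l.length) :
    PySem.List.pyGetD l ((k : Int) + 1) 0 = l[k + 1] ∧
    PySem.List.pyGetD l (((k : Int) + 1) - 1) 0 = l[k] ∧
    PySem.List.pyGetD l (((k : Int) + 1) + 1) 0 = l[k + 2] := by
  have e1 : ((k : Int) + 1) = ((k + 1 : Nat) : Int) := by omega
  have e0 : (((k : Int) + 1) - 1) = ((k : Nat) : Int) := by omega
  have e2 : (((k : Int) + 1) + 1) = ((k + 2 : Nat) : Int) := by omega
  refine ⟨?_, ?_, ?_⟩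
  · rw [e1, PySem.List.pyGetD_natCast, List.getD_eq_getElem _ _ (by omega)]
  · rw [e0, PySem.List.pyGetD_natCast, List.getD_eq_getElem _ _ (by omega)]
  · rw [e2, PySem.List.pyGetD_natCast, List.getD_eq_getElem _ _ (by omega)]

theorem espaldaCamello_iff (l : List Int) :
    espaldaCamello l = true ↔ 2 ≤ l.length ∧ CamelSpec l := by
  unfold espaldaCamello
  rw [PySem.List.foldl_ite_add_one]
  simp only [zero_add]
  split_ifs with hc
  · simp only [true_iff]
    obtain ⟨h2, hall⟩ := (count_iff _ _).mp hc
    refine ⟨h2, ?_⟩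
    intro k hk
    have hm : ((k : Int) + 1) ∈ PySem.List.pyRange 1 ((l.length : Int) - 1) 1 :=
      PySem.List.mem_pyRange_one.mpr (by omega)
    have hx := hall _ hm
    obtain ⟨r1, r0, r2⟩ := pyGetD_reads l k hk
    simp only [decide_eq_true_eq, r1, r0, r2] at hx
    tauto
  · simp only [false_iff]
    rintro ⟨h2, hs⟩
    apply hc
    apply (count_iff _ _).mpr
    refine ⟨h2, ?_⟩
    intro i hi
    have hi' := PySem.List.mem_pyRange_one.mp hi
    obtain ⟨k, rfl⟩ : ∃ k : Nat, i = (k : Int) + 1 := ⟨(i - 1).toNat, by omega⟩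
    have hk : k + 2 < l.length := by omega
    obtain ⟨r1, r0, r2⟩ := pyGetD_reads l k hk
    simp only [decide_eq_true_eq, r1, r0, r2]
    have := hs k hk
    tauto

theorem espaldaCamello_alt_iff (l : List Int) :
    espaldaCamello_alt l = true ↔ 2 ≤ l.length ∧ CamelSpec l := by
  unfold espaldaCamello_alt
  by_cases h2 : l.length < 2
  · rw [if_pos h2]
    constructor
    · intro h; exact absurd h (by simp)
    · rintro ⟨h, -⟩; exact absurd h (by omega)
  · rw [if_neg h2]
    simp only [List.all_eq_true]
    rw [List.forall_mem_iff_getElem]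
    have hpl : (((l.zip (l.drop 1)).map
        (fun p => if p.1 < p.2 then (1 : Int) else if p.1 > p.2 then -1 else 0)).zip
        (((l.zip (l.drop 1)).map
        (fun p => if p.1 < p.2 then (1 : Int) else if p.1 > p.2 then -1 else 0)).drop 1)).length
        = l.length - 2 := by
      simp only [List.length_zip, List.length_map, List.length_drop]
      omega
    constructor
    · intro h
      refine ⟨by omega, ?_⟩
      intro k hk
      have hk' : k < _ := hpl ▸ (by omega : k < l.length - 2)
      have hx := h k hk'
      have e1 : 1 + k = k + 1 := by omega
      have e2 : 1 + (k + 1) = k + 2 := by omega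
      simp only [List.getElem_zip, List.getElem_drop, List.getElem_map, e1, e2] at hx
      exact (sign_mul_iff l[k] l[k + 1] l[k + 2]).mp hx
    · rintro ⟨-, hs⟩
      intro k hk
      rw [hpl] at hk
      have hk2 : k + 2 < l.length := by omega
      have e1 : 1 + k = k + 1 := by omega
      have e2 : 1 + (k + 1) = k + 2 := by omega
      simp only [List.getElem_zip, List.getElem_drop, List.getElem_map, e1, e2]
      exact (sign_mul_iff l[k] l[k + 1] l[k + 2]).mpr (hs k hk2)

-- ===== VERDICT (by name: the statement is the Claim_ definition above) =====
theorem espaldaCamello_spec : Claim_equal_espaldaCamello := by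
  intro lista _
  unfold Spec_espaldaCamello
  exact Bool.coe_iff_coe.mp
    ((espaldaCamello_iff lista).trans (espaldaCamello_alt_iff lista).symm)
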